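-- pv_equiv track=rewrite | github.com/Gusty-Dusty/advent_of_code_2025 | day06/day06.py | problem_one
-- ===== SOURCE A (Python) =====
-- import math
--
-- def problem_one(data):
--     problems = []
--     total = 0
--     for line in data.splitlines():
--         problem = line.split(" ")
--         cleaned = []
--         for item in problem:
--             if item != "":
--                 try:
--                     cleaned.append(int(item))
--                 except:
--                     cleaned.append(item)
--         problems.append(cleaned)
--     for x in range(len(problems[0])):
--         problem_total = 0
--         match problems[-1][x]:
--             case "*":
--                 problem_set = []
--                 for item in range(len(problems) - 1):
--                     problem_set.append(problems[item][x])
--                 problem_total = math.prod(problem_set)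
--             case "+":
--                 problem_total = 0
--                 for item in range(len(problems) - 1):
--                     problem_total += problems[item][x]
--         total += problem_total
--     return total
-- ===== SOURCE B (Python) =====
-- def problem_one(data):
--     problems = []
--     for line in data.splitlines():
--         cleaned = []
--         for item in line.split(" "):
--             if item == "":
--                 continue
--             try:
--                 cleaned.append(int(item))
--             except ValueError:
--                 cleaned.append(item)
--         problems.append(cleaned)
--     ops = problems[-1]
--     width = len(problems[0])
--     acc = [1 if ops[x] == "*" else 0 for x in range(width)]
--     for row in problems[:-1]:
--         acc = [acc[x] * row[x] if ops[x] == "*"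
--                else acc[x] + row[x] if ops[x] == "+"
--                else acc[x]
--                for x in range(width)]
--     return sum(acc)
-- ===== Notes on version B (the rewrite author's own statement) =====
-- stated objective: alternative
-- what changed: A works column-major, gathering each column into a list and applying math.prod or a summing loop per column; B makes one row-major sweep over the data rows, updating a per-column accumulator vector initialised from the operator row (1 for '*', 0 otherwise) and summing it at the end.
import Mathlib
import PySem

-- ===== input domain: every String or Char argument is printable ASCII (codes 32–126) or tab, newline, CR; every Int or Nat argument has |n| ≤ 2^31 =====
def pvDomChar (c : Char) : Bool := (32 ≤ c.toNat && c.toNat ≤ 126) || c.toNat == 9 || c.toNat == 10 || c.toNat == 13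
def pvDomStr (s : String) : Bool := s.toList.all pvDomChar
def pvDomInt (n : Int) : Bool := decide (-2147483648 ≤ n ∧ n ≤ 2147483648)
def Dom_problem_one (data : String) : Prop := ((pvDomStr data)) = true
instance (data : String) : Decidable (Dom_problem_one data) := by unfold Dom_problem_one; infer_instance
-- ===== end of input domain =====

-- B replaces A's column-major pass (gather each column, then math.prod/sum) with one
-- row-major sweep updating a per-column accumulator vector: an alternative decomposition,
-- same asymptotic cost. Equality proved on Pre_ (the inputs where A returns normally).

-- A parsed cell: int(item) if it parses, else the raw string (shared by both ports).
inductive PCell where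
  | int : Int → PCell
  | str : String → PCell
deriving DecidableEq, Repr

-- 'cleaned' loop of the (identical) parsing code of A and B
def cleanLine (line : String) : List PCell :=
  ((PySem.Str.split? line " ").getD []).foldl
    (fun cleaned item =>
      if item ≠ "" then
        cleaned ++ [match PySem.Int.ofStr? item with
                    | some n => PCell.int n
                    | none => PCell.str item]
      else cleaned) []

-- problems[item][x] as an Int (Pre_ guarantees the cell exists and is an int where used)
def cellInt : Option PCell → Int
  | some (PCell.int n) => n
  | _ => 0

-- ===== PORT A =====
def problem_one (data : String) : Int :=
  let problems := (PySem.Str.splitlines data).foldl (fun ps line => ps ++ [cleanLine line]) []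
  match PySem.List.pyGet? problems 0 with
  | none => 0   -- problems[0]: IndexError, excluded by Pre_
  | some row0 =>
    (PySem.List.pyRange 0 (row0.length : Int) 1).foldl (fun total x =>
      let op := PySem.List.pyGet? (PySem.List.pyGetD problems (-1) []) x
      let problem_total : Int :=
        if op = some (PCell.str "*") then
          let problem_set := (PySem.List.pyRange 0 ((problems.length : Int) - 1) 1).foldl
            (fun ps item => ps ++ [cellInt (PySem.List.pyGet? (PySem.List.pyGetD problems item []) x)]) []
          problem_set.prod
        else if op = some (PCell.str "+") then
          (PySem.List.pyRange 0 ((problems.length : Int) - 1) 1).foldl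
            (fun pt item => pt + cellInt (PySem.List.pyGet? (PySem.List.pyGetD problems item []) x)) 0
        else 0
      total + problem_total) 0

-- ===== PORT B =====
def problem_one_alt (data : String) : Int :=
  let problems := (PySem.Str.splitlines data).foldl (fun ps line => ps ++ [cleanLine line]) []
  let ops := PySem.List.pyGetD problems (-1) []
  match PySem.List.pyGet? problems 0 with
  | none => 0   -- problems[-1]/problems[0]: IndexError, excluded by Pre_
  | some row0 =>
    let width := row0.length
    let acc0 := (PySem.List.pyRange 0 (width : Int) 1).map (fun x =>
        if PySem.List.pyGet? ops x = some (PCell.str "*") then (1 : Int) else 0)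
    let accF := (PySem.List.slice problems none (some (-1))).foldl (fun acc row =>
        (PySem.List.pyRange 0 (width : Int) 1).map (fun x =>
          if PySem.List.pyGet? ops x = some (PCell.str "*") then
            PySem.List.pyGetD acc x 0 * cellInt (PySem.List.pyGet? row x)
          else if PySem.List.pyGet? ops x = some (PCell.str "+") then
            PySem.List.pyGetD acc x 0 + cellInt (PySem.List.pyGet? row x)
          else PySem.List.pyGetD acc x 0)) acc0
    accF.sum

-- ===== PRECONDITION & SPEC =====
def isIntAt (r : List PCell) (x : Nat) : Bool :=
  match r[x]? with
  | some (PCell.int _) => true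
  | _ => false

-- Pre_ = exactly the inputs where Python A returns normally: at least one line
-- (else problems[0] raises IndexError), the operator row covers every column of the first
-- row (else problems[-1][x] raises IndexError), and under every '*' or '+' column each
-- data row has an int cell there (else IndexError on a short row or TypeError on a string).
def Pre_problem_one (data : String) : Prop :=
  let rows := (PySem.Str.splitlines data).map cleanLine
  rows ≠ [] ∧
  ∀ x : Nat, x < (rows.headD []).length →
    (x < (rows.getLastD []).length ∧
     (((rows.getLastD [])[x]? = some (PCell.str "*") ∨ (rows.getLastD [])[x]? = some (PCell.str "+")) →
       ∀ r ∈ rows.dropLast, isIntAt r x = true))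
instance (data : String) : Decidable (Pre_problem_one data) := by unfold Pre_problem_one; infer_instance

def pvWitness_problem_one : String := "3 2\n4 10\n* +"

def Spec_problem_one (data : String) (out : Int) : Prop := out = problem_one_alt data
instance (data : String) (out : Int) : Decidable (Spec_problem_one data out) := by unfold Spec_problem_one; infer_instance

-- ===== CLAIM (what is proved, stated in full; the proofs are below) =====
def Claim_equal_problem_one : Prop := ∀ (data : String), Dom_problem_one data → Pre_problem_one data → Spec_problem_one data (problem_one data)

-- ===== LEMMAS AND PROOFS =====


-- B's row sweep rebuilds the accumulator as a comprehension over the columns; this exchange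
-- lemma turns the fold over rows of such rebuilds into a per-column fold.
lemma fold_rows_map (w : Nat) (F : Int → Int → List PCell → Int)
    (rs : List (List PCell)) (h : Int → Int) :
    rs.foldl (fun acc row =>
        (PySem.List.pyRange 0 (w : Int) 1).map (fun x =>
          F x (PySem.List.pyGetD acc x 0) row))
      ((PySem.List.pyRange 0 (w : Int) 1).map h)
    = (PySem.List.pyRange 0 (w : Int) 1).map
        (fun x => rs.foldl (fun v row => F x v row) (h x)) := by
  induction rs generalizing h with
  | nil => simp
  | cons r rs ih =>
    simp only [List.foldl_cons]
    have hstep : (PySem.List.pyRange 0 (w : Int) 1).map (fun x =>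
        F x (PySem.List.pyGetD ((PySem.List.pyRange 0 (w : Int) 1).map h) x 0) r)
        = (PySem.List.pyRange 0 (w : Int) 1).map (fun x => F x (h x) r) := by
      apply List.map_congr_left
      intro x hx
      rw [PySem.List.mem_pyRange_one] at hx
      rw [PySem.List.pyGetD_map_pyRange_of_nonneg h (w : Int) x 0 hx.1 hx.2]
    rw [hstep, ih (fun x => F x (h x) r)]

-- indexing 'problems[item]' for item < len-1 reads the dropLast part
lemma pyGetD_dropLast (rows : List (List PCell)) (j : Int)
    (h0 : 0 ≤ j) (h1 : j < (rows.dropLast.length : Int)) :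
    PySem.List.pyGetD rows j ([] : List PCell) = PySem.List.pyGetD rows.dropLast j [] := by
  have hle : rows.dropLast.length ≤ rows.length := by
    simp [List.length_dropLast]
  rw [PySem.List.pyGetD_eq_getElem rows [] h0 (h1.trans_le (Nat.cast_le.mpr hle)),
      PySem.List.pyGetD_eq_getElem rows.dropLast [] h0 h1]
  exact (List.getElem_dropLast ..).symm

-- the gathered column of A is the cell reader mapped over the data rows
lemma map_range_cells (rows : List (List PCell)) (x : Int) (hne : rows ≠ []) :
    (PySem.List.pyRange 0 ((rows.length : Int) - 1) 1).map
      (fun item => cellInt (PySem.List.pyGet? (PySem.List.pyGetD rows item []) x))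
    = rows.dropLast.map (fun row => cellInt (PySem.List.pyGet? row x)) := by
  have hpos : 1 ≤ rows.length := by
    cases rows with
    | nil => exact absurd rfl hne
    | cons a t => simp
  have hlen : (rows.length : Int) - 1 = (rows.dropLast.length : Int) := by
    simp [List.length_dropLast]
    omega
  rw [hlen]
  have hcong : (PySem.List.pyRange 0 ((rows.dropLast.length : Int)) 1).map
      (fun item => cellInt (PySem.List.pyGet? (PySem.List.pyGetD rows item []) x))
      = (PySem.List.pyRange 0 ((rows.dropLast.length : Int)) 1).map
      (fun item => cellInt (PySem.List.pyGet? (PySem.List.pyGetD rows.dropLast item []) x)) := by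
    apply List.map_congr_left
    intro j hj
    rw [PySem.List.mem_pyRange_one] at hj
    rw [pyGetD_dropLast rows j hj.1 hj.2]
  rw [hcong]
  have hback : (PySem.List.pyRange 0 ((rows.dropLast.length : Int)) 1).map
      (fun item => PySem.List.pyGetD rows.dropLast item ([] : List PCell)) = rows.dropLast :=
    PySem.List.map_pyGetD_pyRange_zero' rows.dropLast ([] : List PCell)
  conv_rhs => rw [← hback, List.map_map]
  rfl

-- ===== VERDICT (by name: the statement is the Claim_ definition above) =====
theorem problem_one_spec : Claim_equal_problem_one := by
  intro data _ hpre
  unfold Spec_problem_one problem_one problem_one_alt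
  simp only [PySem.List.foldl_append_singleton_eq_map, List.nil_append]
  obtain ⟨hne, -⟩ := hpre
  set rows := (PySem.Str.splitlines data).map cleanLine with hrowsdef
  cases hrows : rows with
  | nil => exact absurd hrows hne
  | cons r0 rest =>
  rw [PySem.List.pyGet?_zero_cons]
  simp only []
  rw [← hrows]
  set ops := PySem.List.pyGetD rows (-1) ([] : List PCell) with hops
  rw [PySem.List.foldl_add (g := fun x =>
    if PySem.List.pyGet? ops x = some (PCell.str "*") then
      ((PySem.List.pyRange 0 ((rows.length : Int) - 1) 1).map
        (fun item => cellInt (PySem.List.pyGet? (PySem.List.pyGetD rows item []) x))).prod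
    else if PySem.List.pyGet? ops x = some (PCell.str "+") then
      (PySem.List.pyRange 0 ((rows.length : Int) - 1) 1).foldl
        (fun pt item => pt + cellInt (PySem.List.pyGet? (PySem.List.pyGetD rows item []) x)) 0
    else 0)]
  rw [PySem.List.slice_to_neg_one]
  rw [fold_rows_map r0.length
    (fun x v row =>
      if PySem.List.pyGet? ops x = some (PCell.str "*") then
        v * cellInt (PySem.List.pyGet? row x)
      else if PySem.List.pyGet? ops x = some (PCell.str "+") then
        v + cellInt (PySem.List.pyGet? row x)
      else v)
    rows.dropLast
    (fun x => if PySem.List.pyGet? ops x = some (PCell.str "*") then (1 : Int) else 0)]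
  rw [zero_add]
  congr 1
  apply List.map_congr_left
  intro x hx
  by_cases h1 : PySem.List.pyGet? ops x = some (PCell.str "*")
  · simp only [eq_true h1, if_true]
    rw [map_range_cells rows x hne, List.prod_eq_foldl, List.foldl_map]
  · by_cases h2 : PySem.List.pyGet? ops x = some (PCell.str "+")
    · simp only [eq_false h1, eq_true h2, if_false, if_true]
      rw [PySem.List.foldl_add (g := fun item =>
            cellInt (PySem.List.pyGet? (PySem.List.pyGetD rows item []) x)),
          map_range_cells rows x hne,
          PySem.List.foldl_add (g := fun row => cellInt (PySem.List.pyGet? row x))]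
    · simp only [eq_false h1, eq_false h2, if_false]
      exact (PySem.List.foldl_ignore rows.dropLast 0).symm
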